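-- pv_equiv track=rewrite | github.com/ajnirp/binarysearch | word-formation.py | solve
-- ===== SOURCE A (Python) =====
-- from collections import Counter
--
-- def solve(words, letters):
--     lc = Counter(letters)
--     max_len = 0
--     for word in words:
--         wc = Counter(word)
--         if all(k in lc and lc[k] >= wc[k] for k in wc):
--             max_len = max(max_len, len(word))
--     return max_len
-- ===== SOURCE B (Python) =====
-- from collections import Counter
--
-- def solve(words, letters):
--     lc = Counter(letters)
--     for word in sorted(words, key=len, reverse=True):
--         if not Counter(word) - lc:
--             return len(word)
--     return 0
-- ===== Notes on version B (the rewrite author's own statement) =====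
-- stated objective: simpler
-- what changed: B sorts the words by descending length once and returns the length of the first feasible word (early exit, feasibility via Counter subtraction) instead of A's full scan with a running max.
import Mathlib
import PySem

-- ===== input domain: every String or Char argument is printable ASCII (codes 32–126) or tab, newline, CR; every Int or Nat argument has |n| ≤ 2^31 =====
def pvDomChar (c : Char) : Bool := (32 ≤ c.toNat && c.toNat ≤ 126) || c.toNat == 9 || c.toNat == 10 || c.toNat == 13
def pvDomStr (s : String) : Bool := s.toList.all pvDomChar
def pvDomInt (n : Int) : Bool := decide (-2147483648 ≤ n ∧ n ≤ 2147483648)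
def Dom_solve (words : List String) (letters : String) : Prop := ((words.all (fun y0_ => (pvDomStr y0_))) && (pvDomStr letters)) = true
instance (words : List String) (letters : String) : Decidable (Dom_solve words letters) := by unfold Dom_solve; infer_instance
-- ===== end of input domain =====

-- B sorts the words by descending length and returns the length of the first feasible word
-- (early exit) instead of scanning all words with a running max: a simpler, differently-shaped pass.


-- ===== PORT A =====
def solve (words : List String) (letters : String) : Int :=
  let lc := PySem.Dict.counter letters.toList
  words.foldl (fun max_len word =>
    let wc := PySem.Dict.counter word.toList
    if wc.keys.all (fun k => lc.contains k && decide (wc.getD k 0 ≤ lc.getD k 0)) then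
      max max_len (PySem.Str.len word)
    else max_len) 0

-- ===== PORT B =====
-- hand port of Python's 'Counter(word) - lc' being falsy: Counter subtraction keeps only the
-- positive counts, so 'not (wc - lc)' ⟺ no item of wc exceeds its count in lc (exact)
def counterSubEmpty (wc lc : PySem.Dict Char Int) : Bool :=
  (wc.items.filter (fun kv => decide (0 < kv.2 - lc.getD kv.1 0))).isEmpty

def solve_alt (words : List String) (letters : String) : Int :=
  let lc := PySem.Dict.counter letters.toList
  match (PySem.List.sorted words (fun w => PySem.Str.len w) true).find?
        (fun word => counterSubEmpty (PySem.Dict.counter word.toList) lc) with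
  | some word => PySem.Str.len word
  | none => 0

-- ===== PRECONDITION & SPEC =====
def Spec_solve (words : List String) (letters : String) (out : Int) : Prop := out = solve_alt words letters
instance (words : List String) (letters : String) (out : Int) : Decidable (Spec_solve words letters out) := by unfold Spec_solve; infer_instance

-- ===== CLAIM (what is proved, stated in full; the proofs are below) =====
def Claim_equal_solve : Prop := ∀ (words : List String) (letters : String), Dom_solve words letters → Spec_solve words letters (solve words letters)

-- ===== LEMMAS AND PROOFS =====

-- A's per-word feasibility test equals B's (both say: every char count in word ≤ its count in letters)
theorem feas_eq (word letters : String) :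
    ((PySem.Dict.counter word.toList).keys.all (fun k =>
        (PySem.Dict.counter letters.toList).contains k &&
        decide ((PySem.Dict.counter word.toList).getD k 0 ≤ (PySem.Dict.counter letters.toList).getD k 0)))
    = counterSubEmpty (PySem.Dict.counter word.toList) (PySem.Dict.counter letters.toList) := by
  simp only [counterSubEmpty, PySem.Dict.keys_counter, PySem.Dict.items_counter,
    PySem.Dict.getD_counter, PySem.Dict.contains_counter]
  rw [Bool.eq_iff_iff]
  simp only [List.isEmpty_iff, List.filter_eq_nil_iff, List.all_eq_true, List.mem_map,
    Bool.and_eq_true, decide_eq_true_eq]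
  constructor
  · rintro h ⟨k, v⟩ ⟨c, hc, hkv⟩
    obtain ⟨h1, h2⟩ := h c hc
    cases hkv
    dsimp only
    omega
  · intro h k hk
    have := h (k, (word.toList.count k : Int)) ⟨k, hk, rfl⟩
    dsimp only at this
    have hmem : k ∈ word.toList := (PySem.Set.mem_ofList _ _).mp hk
    have hpos : 0 < word.toList.count k := List.count_pos_iff.mpr hmem
    constructor
    · have : (1 : Int) ≤ (letters.toList.count k : Int) := by omega
      have : 0 < letters.toList.count k := by exact_mod_cast this
      simpa using List.count_pos_iff.mp this
    · omega

-- the A-side loop step, with the feasibility test abstracted to a boolean predicate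
theorem foldl_step_const (feas : String → Bool) (l : List String) (m : Int)
    (h : ∀ w ∈ l, PySem.Str.len w ≤ m) :
    l.foldl (fun acc w => if feas w then max acc (PySem.Str.len w) else acc) m = m := by
  induction l with
  | nil => rfl
  | cons w t ih =>
    have hw := h w (List.mem_cons_self ..)
    have : (if feas w then max m (PySem.Str.len w) else m) = m := by
      split <;> omega
    simp only [List.foldl_cons, this]
    exact ih fun y hy => h y (List.mem_cons_of_mem _ hy)

-- on a list sorted by non-increasing length, running-max-of-feasible = length of first feasible
theorem foldl_eq_find (feas : String → Bool) (l : List String)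
    (hs : l.Pairwise (fun a b => PySem.Str.len b ≤ PySem.Str.len a)) :
    l.foldl (fun acc w => if feas w then max acc (PySem.Str.len w) else acc) 0
      = (match l.find? feas with
         | some w => PySem.Str.len w
         | none => 0) := by
  induction l with
  | nil => rfl
  | cons w t ih =>
    rw [List.pairwise_cons] at hs
    obtain ⟨hw, ht⟩ := hs
    by_cases hf : feas w = true
    · have hlen : 0 ≤ PySem.Str.len w := by
        simp [PySem.Str.len_eq]
      rw [List.find?_cons_of_pos hf]
      simp only [List.foldl_cons, if_pos hf]
      have hmax : max (0 : Int) (PySem.Str.len w) = PySem.Str.len w := by omega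
      rw [hmax]
      exact foldl_step_const feas t (PySem.Str.len w) hw
    · rw [List.find?_cons_of_neg (by simp [hf])]
      simp only [List.foldl_cons, if_neg hf]
      exact ih ht

-- the A-side fold is invariant under permutation of the word list
theorem foldl_perm (feas : String → Bool) {l₁ l₂ : List String} (hp : l₁.Perm l₂) (init : Int) :
    l₁.foldl (fun acc w => if feas w then max acc (PySem.Str.len w) else acc) init
      = l₂.foldl (fun acc w => if feas w then max acc (PySem.Str.len w) else acc) init := by
  refine hp.foldl_eq' ?_ init
  intro x _ y _ z
  split <;> split <;> omega

-- ===== VERDICT (by name: the statement is the Claim_ definition above) =====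
theorem solve_spec : Claim_equal_solve := by
  intro words letters _
  unfold Spec_solve solve solve_alt
  simp only []
  set lc := PySem.Dict.counter letters.toList with hlc
  set feas : String → Bool := fun word =>
    counterSubEmpty (PySem.Dict.counter word.toList) lc with hfeas
  have hstep : ∀ (acc : Int) (word : String),
      (fun max_len word =>
        let wc := PySem.Dict.counter word.toList
        if wc.keys.all (fun k => lc.contains k && decide (wc.getD k 0 ≤ lc.getD k 0)) then
          max max_len (PySem.Str.len word)
        else max_len) acc word
      = (fun acc w => if feas w then max acc (PySem.Str.len w) else acc) acc word := by
    intro acc word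
    simp only [hfeas, hlc, feas_eq word letters]
  rw [List.foldl_ext _ _ 0 (fun acc w _ => hstep acc w)]
  rw [foldl_perm feas (PySem.List.sorted_perm words (fun w => PySem.Str.len w) true).symm 0]
  exact foldl_eq_find feas _ (PySem.List.sorted_pairwise_rev words _)
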